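-- pv_equiv track=rewrite | github.com/gaurinicky/RubiksCubeSolver | test_problems.py | createGoalCube
-- ===== SOURCE A (Python) =====
-- def createGoalCube(cube):
--     #set the cube colour dictionary
--     for i in range(1,25):
--         if i/4.0 > 5:
--             cube[i] = "g"
--         elif i/4.0 > 4:
--             cube[i] = "o"
--         elif i/4.0 > 3:
--             cube[i] = "y"
--         elif i/4.0 > 2:
--             cube[i] = "r"
--         elif i/4.0 > 1:
--             cube[i] = "w"
--         else:
--             cube[i] = "b"
--     return cube
-- ===== SOURCE B (Python) =====
-- def createGoalCube(cube):
--     # stream the goal colors as one flat string and zip it onto keys 1..24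
--     cube.update(zip(range(1, 25), "bbbbwwwwrrrryyyyoooogggg"))
--     return cube
-- ===== Notes on version B (the rewrite author's own statement) =====
-- stated objective: idiomatic
-- what changed: Instead of classifying each index with a six-way float-threshold cascade, B lays out the whole goal colouring as one 24-character string and bulk-inserts it with dict.update(zip(range(1,25), colors)), so there is no per-index branching or arithmetic at all.
import Mathlib
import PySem

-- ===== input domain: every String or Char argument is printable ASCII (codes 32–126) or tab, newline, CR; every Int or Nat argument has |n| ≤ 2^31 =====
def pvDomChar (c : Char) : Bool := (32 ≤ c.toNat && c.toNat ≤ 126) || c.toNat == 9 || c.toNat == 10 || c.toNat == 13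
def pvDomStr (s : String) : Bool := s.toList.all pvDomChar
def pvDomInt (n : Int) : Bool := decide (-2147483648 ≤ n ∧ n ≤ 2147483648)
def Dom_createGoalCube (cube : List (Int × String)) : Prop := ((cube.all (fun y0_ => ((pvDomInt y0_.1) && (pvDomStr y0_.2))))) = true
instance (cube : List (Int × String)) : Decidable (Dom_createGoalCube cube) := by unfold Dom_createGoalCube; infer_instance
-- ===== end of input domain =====

-- B replaces A's per-index six-way float-threshold cascade by one bulk dict.update over
-- zip(range(1,25), a 24-character colour string) (objective: idiomatic; the return value
-- and the in-place dict mutation coincide).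

-- ===== PORT A =====
-- A compares i/4.0 > n (floats). For the integers i ∈ range(1,25) and n ∈ {1,…,5} this is
-- exact: i/4.0 > n ↔ i > 4*n (division of a small int by 4.0 is exact in binary floats),
-- so the float comparison is ported as the equivalent integer comparison, step for step.
def createGoalCube (cube : List (Int × String)) : List (Int × String) :=
  ((PySem.List.pyRange 1 25 1).foldl (fun d i =>
    if i > 4 * 5 then d.insert i "g"
    else if i > 4 * 4 then d.insert i "o"
    else if i > 4 * 3 then d.insert i "y"
    else if i > 4 * 2 then d.insert i "r"
    else if i > 4 * 1 then d.insert i "w"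
    else d.insert i "b") (PySem.Dict.ofList cube)).items

-- ===== PORT B =====
-- dict.update(zip(...)) inserts each (key, 1-char string) pair in zip order.
def createGoalCube_alt (cube : List (Int × String)) : List (Int × String) :=
  (((PySem.List.pyRange 1 25 1).zip "bbbbwwwwrrrryyyyoooogggg".toList).foldl (fun d p => d.insert p.1 (String.ofList [p.2])) (PySem.Dict.ofList cube)).items

-- ===== PRECONDITION & SPEC =====
def Spec_createGoalCube (cube : List (Int × String)) (out : List (Int × String)) : Prop := out = createGoalCube_alt cube
instance (cube : List (Int × String)) (out : List (Int × String)) : Decidable (Spec_createGoalCube cube out) := by unfold Spec_createGoalCube; infer_instance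

-- ===== CLAIM (what is proved, stated in full; the proofs are below) =====
def Claim_equal_createGoalCube : Prop := ∀ (cube : List (Int × String)), Dom_createGoalCube cube → Spec_createGoalCube cube (createGoalCube cube)

-- ===== LEMMAS AND PROOFS =====

-- ===== VERDICT (by name: the statement is the Claim_ definition above) =====
-- proof-only helper: the goal colouring as an association list
def goalAssoc : List (Int × String) := [(1, "b"), (2, "b"), (3, "b"), (4, "b"), (5, "w"), (6, "w"), (7, "w"), (8, "w"), (9, "r"), (10, "r"), (11, "r"), (12, "r"), (13, "y"), (14, "y"), (15, "y"), (16, "y"), (17, "o"), (18, "o"), (19, "o"), (20, "o"), (21, "g"), (22, "g"), (23, "g"), (24, "g")]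

theorem createGoalCube_spec : Claim_equal_createGoalCube := by
  intro cube _
  unfold Spec_createGoalCube createGoalCube createGoalCube_alt
  have hf : (fun (d : PySem.Dict Int String) (i : Int) =>
      if i > 4 * 5 then d.insert i "g"
      else if i > 4 * 4 then d.insert i "o"
      else if i > 4 * 3 then d.insert i "y"
      else if i > 4 * 2 then d.insert i "r"
      else if i > 4 * 1 then d.insert i "w"
      else d.insert i "b")
      = fun d i => d.insert ((fun (j : Int) => j) i)
          ((fun (j : Int) => if j > 4 * 5 then "g" else if j > 4 * 4 then "o"
            else if j > 4 * 3 then "y" else if j > 4 * 2 then "r"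
            else if j > 4 * 1 then "w" else "b") i) := by
    funext d i; dsimp only; split_ifs <;> rfl
  have hg : (fun (d : PySem.Dict Int String) (p : Int × Char) =>
      d.insert p.1 (String.ofList [p.2]))
      = fun d p => d.insert ((fun (q : Int × Char) => (q.1, String.ofList [q.2])) p).1
          ((fun (q : Int × Char) => (q.1, String.ofList [q.2])) p).2 := rfl
  rw [hf, hg]
  have hA : List.foldl
      (fun (d : PySem.Dict Int String) (i : Int) => d.insert ((fun (j : Int) => j) i)
        ((fun (j : Int) => if j > 4 * 5 then "g" else if j > 4 * 4 then "o"
          else if j > 4 * 3 then "y" else if j > 4 * 2 then "r"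
          else if j > 4 * 1 then "w" else "b") i))
      (PySem.Dict.ofList cube) (PySem.List.pyRange 1 25 1)
      = List.foldl (fun d p => d.insert p.1 p.2) (PySem.Dict.ofList cube)
        ((PySem.List.pyRange 1 25 1).map
          (fun (i : Int) => (i, if i > 4 * 5 then "g" else if i > 4 * 4 then "o"
            else if i > 4 * 3 then "y" else if i > 4 * 2 then "r"
            else if i > 4 * 1 then "w" else "b"))) := by
    rw [List.foldl_map]
  have hB : List.foldl
      (fun (d : PySem.Dict Int String) (p : Int × Char) =>
        d.insert ((fun (q : Int × Char) => (q.1, String.ofList [q.2])) p).1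
          ((fun (q : Int × Char) => (q.1, String.ofList [q.2])) p).2)
      (PySem.Dict.ofList cube) ((PySem.List.pyRange 1 25 1).zip "bbbbwwwwrrrryyyyoooogggg".toList)
      = List.foldl (fun d p => d.insert p.1 p.2) (PySem.Dict.ofList cube)
        (((PySem.List.pyRange 1 25 1).zip "bbbbwwwwrrrryyyyoooogggg".toList).map
          (fun (q : Int × Char) => (q.1, String.ofList [q.2]))) := by
    rw [List.foldl_map]
  rw [hA, hB]
  have e1 : (PySem.List.pyRange 1 25 1).map
      (fun (i : Int) => (i, if i > 4 * 5 then "g" else if i > 4 * 4 then "o"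
        else if i > 4 * 3 then "y" else if i > 4 * 2 then "r"
        else if i > 4 * 1 then "w" else "b")) = goalAssoc := by decide
  have e2 : ((PySem.List.pyRange 1 25 1).zip "bbbbwwwwrrrryyyyoooogggg".toList).map
      (fun (q : Int × Char) => (q.1, String.ofList [q.2])) = goalAssoc := by decide
  rw [e1, e2]
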